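-- pv_equiv track=rewrite | github.com/PPortela00/Recommendation-System--- | NLP&TS/utility_func.py | group_rows_by_model
-- ===== SOURCE A (Python) =====
-- def group_rows_by_model(data):
--     grouped_data = {}
--     header = data[0]
--     added_metric_header = False
--
--     for row in data[2:]:
--         model_name = row[0].split(" (")[0] # Extract the model name without the parenthesis
--         if model_name not in grouped_data:
--             grouped_data[model_name] = [row]
--         else:
--             grouped_data[model_name].append(row)
--
--     # Convert the group dictionary into a list of lists
--     grouped_data_list = [header]
--     for model_name, rows in grouped_data.items():
--         if not added_metric_header:
--             grouped_data_list.append(["", "Precision", "Recall", "F1-Score", "Support"])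
--             added_metric_header = True
--         else:
--             grouped_data_list.append(["", "", "", "", ""]) # Add a blank line as separation
--         grouped_data_list.extend(rows)
--
--     return grouped_data_list
-- ===== SOURCE B (Python) =====
-- def group_rows_by_model(data):
--     rows = data[2:]
--
--     def model_of(row):
--         return row[0].split(" (")[0]
--
--     # ordered list of distinct model names, first-appearance order
--     seen = []
--     for row in rows:
--         n = model_of(row)
--         if n not in seen:
--             seen.append(n)
--
--     out = [data[0]]
--     if seen:
--         out.append(["", "Precision", "Recall", "F1-Score", "Support"])
--         out.extend(r for r in rows if model_of(r) == seen[0])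
--         for n in seen[1:]:
--             out.append(["", "", "", "", ""])
--             out.extend(r for r in rows if model_of(r) == n)
--     return out
-- ===== Notes on version B (the rewrite author's own statement) =====
-- stated objective: alternative
-- what changed: Replaced A's single-pass dict-of-buckets accumulation with an ordered first-appearance list of distinct model names plus a per-name filter scan of the rows, handling the first name (metric header) separately from the rest (blank separators).
-- outside the precondition, e.g. on group_rows_by_model([]): A raises IndexError, B raises IndexError; on group_rows_by_model([['H'], ['x'], []]): A raises IndexError, B raises IndexError
import Mathlib
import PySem

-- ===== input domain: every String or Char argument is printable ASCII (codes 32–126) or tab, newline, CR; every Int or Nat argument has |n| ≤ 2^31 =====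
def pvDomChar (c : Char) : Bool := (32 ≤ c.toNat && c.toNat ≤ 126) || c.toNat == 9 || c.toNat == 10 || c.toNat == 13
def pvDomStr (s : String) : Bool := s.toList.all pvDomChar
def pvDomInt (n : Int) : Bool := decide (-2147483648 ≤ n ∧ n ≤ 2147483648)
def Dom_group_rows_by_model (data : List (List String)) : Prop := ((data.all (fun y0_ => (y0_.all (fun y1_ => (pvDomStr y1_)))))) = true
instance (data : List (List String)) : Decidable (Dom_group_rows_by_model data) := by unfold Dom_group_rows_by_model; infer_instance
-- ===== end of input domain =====

-- B replaces A's dict-bucket accumulation by an ordered list of distinct model names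
-- plus a per-name filter scan of the data rows (objective: alternative decomposition, not faster).

-- shared helper: row[0].split(" (")[0]  (total via pyGetD; exact on Pre_, where row ≠ [])
def pvModelName (row : List String) : String :=
  PySem.List.pyGetD ((PySem.Str.split? (PySem.List.pyGetD row 0 "") " (").getD []) 0 ""

def pvMetricHeader : List String := ["", "Precision", "Recall", "F1-Score", "Support"]
def pvBlankRow : List String := ["", "", "", "", ""]

-- ===== PORT A =====
def group_rows_by_model (data : List (List String)) : List (List String) :=
  let header := PySem.List.pyGetD data 0 []
  let grouped : PySem.Dict String (List (List String)) :=
    (PySem.List.slice data (some 2) none).foldl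
      (fun d row =>
        let name := pvModelName row
        if d.contains name = false then d.insert name [row]
        else d.modify name [] (fun rs => rs ++ [row]))
      PySem.Dict.empty
  (grouped.items.foldl
    (fun (st : List (List String) × Bool) p =>
      ((if st.2 = false then st.1 ++ [pvMetricHeader] else st.1 ++ [pvBlankRow]) ++ p.2, true))
    ([header], false)).1

-- ===== PORT B =====
def group_rows_by_model_alt (data : List (List String)) : List (List String) :=
  let rows := PySem.List.slice data (some 2) none
  let seen : PySem.Set String :=
    rows.foldl (fun s r => PySem.Set.add s (pvModelName r)) PySem.Set.empty
  let out := [PySem.List.pyGetD data 0 []]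
  match seen with
  | [] => out
  | n0 :: rest =>
      rest.foldl
        (fun acc n => acc ++ ([pvBlankRow] ++ rows.filter (fun r => pvModelName r == n)))
        (out ++ [pvMetricHeader] ++ rows.filter (fun r => pvModelName r == n0))

-- ===== PRECONDITION & SPEC =====
-- Pre_ excludes exactly the inputs where A raises IndexError: empty data (data[0]) and an
-- empty row among data[2:] (row[0]).
def Pre_group_rows_by_model (data : List (List String)) : Prop :=
  data ≠ [] ∧ ∀ row ∈ data.drop 2, row ≠ []
instance (data : List (List String)) : Decidable (Pre_group_rows_by_model data) := by
  unfold Pre_group_rows_by_model; infer_instance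
def pvWitness_group_rows_by_model : List (List String) := [["H"], ["x"], ["m1 (a)", "1"], ["m2", "2"], ["m1 (b)", "3"]]
def Spec_group_rows_by_model (data : List (List String)) (out : List (List String)) : Prop := out = group_rows_by_model_alt data
instance (data : List (List String)) (out : List (List String)) : Decidable (Spec_group_rows_by_model data out) := by unfold Spec_group_rows_by_model; infer_instance

-- ===== CLAIM (what is proved, stated in full; the proofs are below) =====
def Claim_equal_group_rows_by_model : Prop := ∀ (data : List (List String)), Dom_group_rows_by_model data → Pre_group_rows_by_model data → Spec_group_rows_by_model data (group_rows_by_model data)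

-- ===== LEMMAS AND PROOFS =====

-- A's branch is exactly one dict.modify step
theorem pv_step_eq (d : PySem.Dict String (List (List String))) (row : List String) :
    (if d.contains (pvModelName row) = false then d.insert (pvModelName row) [row]
     else d.modify (pvModelName row) [] (fun rs => rs ++ [row]))
    = d.modify (pvModelName row) [] (fun rs => rs ++ [row]) := by
  by_cases h : d.contains (pvModelName row) = true
  · simp [h]
  · simp only [Bool.not_eq_true] at h
    simp [h, PySem.Dict.modify, PySem.Dict.getD_of_not_contains]

-- A's dict as a fold of modifies
theorem pv_dict_eq (rows : List (List String)) :
    rows.foldl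
      (fun d row =>
        let name := pvModelName row
        if d.contains name = false then d.insert name [row]
        else d.modify name [] (fun rs => rs ++ [row]))
      PySem.Dict.empty
    = rows.foldl (fun d r => d.modify (pvModelName r) [] (fun rs => rs ++ [r])) PySem.Dict.empty := by
  have hf : (fun (d : PySem.Dict String (List (List String))) row =>
      let name := pvModelName row
      if d.contains name = false then d.insert name [row]
      else d.modify name [] (fun rs => rs ++ [row]))
      = fun d r => d.modify (pvModelName r) [] (fun rs => rs ++ [r]) := by
    funext d r
    exact pv_step_eq d r
  rw [hf]

theorem pv_getD_dict (rows : List (List String)) (c : String) :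
    (rows.foldl (fun d r => d.modify (pvModelName r) [] (fun rs => rs ++ [r])) PySem.Dict.empty).getD c []
    = rows.filter (fun r => pvModelName r == c) := by
  have h : rows.foldl (fun d r => d.modify (pvModelName r) [] (fun rs => rs ++ [r])) PySem.Dict.empty
      = (rows.map (fun r => (pvModelName r, r))).foldl
          (fun d p => d.modify p.1 [] (fun rs => rs ++ [p.2])) PySem.Dict.empty := by
    rw [List.foldl_map]
  rw [h, PySem.Dict.getD_foldl_modify_append]
  simp [List.filter_map, Function.comp_def]

theorem pv_items_dict (rows : List (List String)) :
    (rows.foldl (fun d r => d.modify (pvModelName r) [] (fun rs => rs ++ [r])) PySem.Dict.empty).items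
    = (PySem.Set.ofList (rows.map pvModelName)).map
        (fun n => (n, rows.filter (fun r => pvModelName r == n))) := by
  have hnd : (rows.foldl (fun d r => d.modify (pvModelName r) [] (fun rs => rs ++ [r]))
      PySem.Dict.empty).keys.Nodup := by
    exact PySem.Dict.nodup_keys_foldl_modify_key rows pvModelName [] (fun d r rs => rs ++ [r])
      PySem.Dict.empty PySem.Dict.nodup_keys_empty
  have hkeys : (rows.foldl (fun d r => d.modify (pvModelName r) [] (fun rs => rs ++ [r]))
      PySem.Dict.empty).keys = PySem.Set.ofList (rows.map pvModelName) := by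
    rw [PySem.Dict.keys_foldl_modify_key]
    simp [PySem.Dict.keys_empty, PySem.Set.update_nil_left]
  rw [PySem.Dict.items_eq_map_keys _ hnd [], hkeys]
  apply List.map_congr_left
  intro n _
  rw [pv_getD_dict]

-- B's seen list is the ordered dedup of the model names
theorem pv_seen_eq (rows : List (List String)) :
    rows.foldl (fun s r => PySem.Set.add s (pvModelName r)) PySem.Set.empty
    = PySem.Set.ofList (rows.map pvModelName) := by
  rw [← PySem.Set.update_map_eq_foldl_add, PySem.Set.update_empty]

-- A's output loop once the metric header has been emitted
theorem pv_loopA_true (l : List (String × List (List String))) (acc : List (List String)) :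
    (l.foldl
      (fun (st : List (List String) × Bool) p =>
        ((if st.2 = false then st.1 ++ [pvMetricHeader] else st.1 ++ [pvBlankRow]) ++ p.2, true))
      (acc, true)).1
    = acc ++ l.flatMap (fun p => pvBlankRow :: p.2) := by
  induction l generalizing acc with
  | nil => simp
  | cons p t ih => simp [ih]

-- B's tail loop as a flatMap
theorem pv_loopB (l : List String) (g : String → List (List String)) (acc : List (List String)) :
    l.foldl (fun acc n => acc ++ ([pvBlankRow] ++ g n)) acc
    = acc ++ l.flatMap (fun n => pvBlankRow :: g n) := by
  induction l generalizing acc with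
  | nil => simp
  | cons n t ih => simp [List.flatMap_def]

-- ===== VERDICT (by name: the statement is the Claim_ definition above) =====
theorem group_rows_by_model_spec : Claim_equal_group_rows_by_model := by
  intro data _ _
  unfold Spec_group_rows_by_model group_rows_by_model group_rows_by_model_alt
  simp only []
  rw [pv_dict_eq, pv_items_dict, ← pv_seen_eq, pv_seen_eq]
  cases h : PySem.Set.ofList ((PySem.List.slice data (some 2) none).map pvModelName) with
  | nil => simp
  | cons n0 rest =>
      simp only [List.map_cons, List.foldl_cons]
      rw [pv_loopA_true, pv_loopB]
      simp [List.flatMap_map]
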